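-- pv_equiv track=rewrite | github.com/really-no-name/PersonalLeetCode | PersonalInterview/zxsk/train/0203.py | max_hires
-- ===== SOURCE A (Python) =====
-- def max_hires(k, a_list):
--     a_list.sort(reverse=True)
--     used = set()
--     total = 0
--
--     for num in a_list:
--         # 从 num 开始往下找一个没有用过的人数
--         while num > 0 and num in used:
--             num -= 1
--         if num > 0:
--             used.add(num)
--             total += num
--     return total
-- ===== SOURCE B (Python) =====
-- def max_hires(k, a_list):
--     # Sorted descending, the assigned values are strictly decreasing, and the
--     # value taken for each num is simply min(num, previous_taken - 1): no used-set,
--     # no inner decrement loop; stop as soon as the next value would be <= 0.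
--     total = 0
--     prev = None
--     for num in sorted(a_list, reverse=True):
--         c = num if prev is None else min(num, prev - 1)
--         if c <= 0:
--             break
--         total += c
--         prev = c
--     return total
-- ===== Notes on version B (the rewrite author's own statement) =====
-- stated objective: faster
-- what changed: Replaces the used-set with inner decrement scan by a single pass over the descending-sorted list keeping only the previously taken value (take min(num, prev-1), stop at <= 0), eliminating the set and the inner while loop.
import Mathlib
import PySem

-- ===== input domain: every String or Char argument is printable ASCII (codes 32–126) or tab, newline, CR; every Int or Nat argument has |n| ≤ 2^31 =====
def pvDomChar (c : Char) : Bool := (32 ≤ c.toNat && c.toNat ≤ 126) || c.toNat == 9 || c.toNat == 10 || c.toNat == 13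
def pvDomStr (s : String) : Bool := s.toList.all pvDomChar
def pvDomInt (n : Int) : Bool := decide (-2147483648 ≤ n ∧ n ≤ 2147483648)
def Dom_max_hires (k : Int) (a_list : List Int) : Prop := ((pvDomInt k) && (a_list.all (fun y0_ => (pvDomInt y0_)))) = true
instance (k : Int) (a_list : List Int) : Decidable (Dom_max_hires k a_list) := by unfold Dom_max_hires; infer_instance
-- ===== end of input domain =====

-- B replaces A's used-set and inner decrement loop by one pass keeping only the previously
-- taken value (take min(num, prev-1), stop at <= 0). Equivalence is about the RETURN value
-- only: the Python A sorts a_list in place, B does not mutate it.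

-- ===== PORT A =====
-- 'while num > 0 and num in used: num -= 1'
def mhDrop (used : PySem.Set Int) (num : Int) : Int :=
  if h : 0 < num ∧ num ∈ used then mhDrop used (num - 1) else num
termination_by num.toNat
decreasing_by omega

-- the for-loop of A over state (used, total)
def mhLoop (used : PySem.Set Int) (total : Int) : List Int → Int
  | [] => total
  | num :: rest =>
    let n := mhDrop used num
    if 0 < n then mhLoop (used.add n) (total + n) rest
    else mhLoop used total rest

def max_hires (k : Int) (a_list : List Int) : Int :=
  mhLoop PySem.Set.empty 0 (PySem.List.sorted a_list (fun x => x) true)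

-- ===== PORT B =====
def mhAltLoop (prev : Option Int) (total : Int) : List Int → Int
  | [] => total
  | num :: rest =>
    let c := match prev with
      | none => num
      | some p => min num (p - 1)
    if c ≤ 0 then total else mhAltLoop (some c) (total + c) rest

def max_hires_alt (k : Int) (a_list : List Int) : Int :=
  mhAltLoop none 0 (PySem.List.sorted a_list (fun x => x) true)

-- ===== PRECONDITION & SPEC =====
def Spec_max_hires (k : Int) (a_list : List Int) (out : Int) : Prop := out = max_hires_alt k a_list
instance (k : Int) (a_list : List Int) (out : Int) : Decidable (Spec_max_hires k a_list out) := by unfold Spec_max_hires; infer_instance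

-- ===== CLAIM (what is proved, stated in full; the proofs are below) =====
def Claim_equal_max_hires : Prop := ∀ (k : Int) (a_list : List Int), Dom_max_hires k a_list → Spec_max_hires k a_list (max_hires k a_list)

-- ===== LEMMAS AND PROOFS =====

-- on a fresh set, the while loop does nothing
lemma mhDrop_empty (num : Int) : mhDrop PySem.Set.empty num = num := by
  rw [mhDrop]
  simp [PySem.Set.empty]

-- the while loop under the interval invariant: used covers exactly [p, M] ∩ used, more
-- precisely used ⊆ [p, ∞) and [p, M] ⊆ used; then dropping from num ≤ M lands on min num (p-1)
lemma mhDrop_interval (used : PySem.Set Int) (p M : Int)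
    (hp : 0 < p)
    (hlo : ∀ v ∈ used, p ≤ v)
    (hcov : ∀ v, p ≤ v → v ≤ M → v ∈ used) :
    ∀ num, num ≤ M → mhDrop used num = min num (p - 1) := by
  intro num
  induction num using mhDrop.induct (used := used) with
  | case1 num h ih =>
    intro hM
    have hge : p ≤ num := hlo num h.2
    rw [mhDrop, dif_pos h, ih (by omega)]
    omega
  | case2 num h =>
    intro hM
    rw [mhDrop, dif_neg h]
    by_cases hge : p ≤ num
    · exact absurd ⟨lt_of_lt_of_le hp hge, hcov num hge hM⟩ h
    · omega

-- if every remaining element drops to ≤ 0, A's loop adds nothing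
lemma mhLoop_dead (used : PySem.Set Int) (total : Int) :
    ∀ l : List Int, (∀ x ∈ l, mhDrop used x ≤ 0) → mhLoop used total l = total := by
  intro l
  induction l with
  | nil => intro _; rfl
  | cons num rest ih =>
    intro h
    have hn : mhDrop used num ≤ 0 := h num (by simp)
    simp only [mhLoop]
    rw [if_neg (by omega)]
    exact ih (fun x hx => h x (List.mem_cons_of_mem _ hx))

-- main invariant: the two loops agree on a descending list
lemma loop_eq : ∀ (l : List Int) (used : PySem.Set Int) (p M total : Int),
    l.Pairwise (fun a b => b ≤ a) → (∀ x ∈ l, x ≤ M) →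
    0 < p → p ≤ M →
    (∀ v ∈ used, p ≤ v) → (∀ v, p ≤ v → v ≤ M → v ∈ used) →
    mhLoop used total l = mhAltLoop (some p) total l := by
  intro l
  induction l with
  | nil => intro _ _ _ _ _ _ _ _ _ _; rfl
  | cons num rest ih =>
    intro used p M total hpw hle hp hpM hlo hcov
    have hnumM : num ≤ M := hle num (by simp)
    have hdrop : mhDrop used num = min num (p - 1) :=
      mhDrop_interval used p M hp hlo hcov num hnumM
    have hrest_le : ∀ x ∈ rest, x ≤ num := fun x hx => (List.pairwise_cons.mp hpw).1 x hx
    have hpw' : rest.Pairwise (fun a b => b ≤ a) := (List.pairwise_cons.mp hpw).2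
    simp only [mhLoop, mhAltLoop, hdrop]
    by_cases hpos : 0 < min num (p - 1)
    · rw [if_pos hpos, if_neg (by omega)]
      set c := min num (p - 1) with hc
      apply ih (used.add c) c num
      · exact hpw'
      · exact hrest_le
      · exact hpos
      · omega
      · intro v hv
        rcases (PySem.Set.mem_add _ _ _).mp hv with h | h
        · have := hlo v h; omega
        · omega
      · intro v hv1 hv2
        by_cases hvc : v = c
        · exact (PySem.Set.mem_add _ _ _).mpr (Or.inr hvc)
        · have hvp : p ≤ v := by omega
          exact (PySem.Set.mem_add _ _ _).mpr (Or.inl (hcov v hvp (le_trans hv2 hnumM)))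
    · rw [if_neg hpos, if_pos (by omega)]
      apply mhLoop_dead
      intro x hx
      have hxn : x ≤ num := hrest_le x hx
      have : mhDrop used x = min x (p - 1) :=
        mhDrop_interval used p M hp hlo hcov x (le_trans hxn hnumM)
      omega

-- ===== VERDICT (by name: the statement is the Claim_ definition above) =====
theorem max_hires_spec : Claim_equal_max_hires := by
  intro k a_list _
  unfold Spec_max_hires max_hires max_hires_alt
  generalize hs : PySem.List.sorted a_list (fun x => x) true = l
  have hpw : l.Pairwise (fun a b => b ≤ a) := by
    rw [← hs]; simpa using PySem.List.sorted_pairwise_rev a_list (fun x => x)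
  clear hs
  cases l with
  | nil => rfl
  | cons num rest =>
    have hrest_le : ∀ x ∈ rest, x ≤ num := fun x hx => (List.pairwise_cons.mp hpw).1 x hx
    have hpw' : rest.Pairwise (fun a b => b ≤ a) := (List.pairwise_cons.mp hpw).2
    simp only [mhLoop, mhAltLoop, mhDrop_empty]
    by_cases hpos : 0 < num
    · rw [if_pos hpos, if_neg (by omega)]
      apply loop_eq rest _ num num _ hpw' hrest_le hpos le_rfl
      · intro v hv
        rcases (PySem.Set.mem_add _ _ _).mp hv with h | h
        · simp [PySem.Set.empty] at h
        · omega
      · intro v hv1 hv2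
        exact (PySem.Set.mem_add _ _ _).mpr (Or.inr (by omega))
    · rw [if_neg hpos, if_pos (by omega)]
      apply mhLoop_dead
      intro x hx
      rw [mhDrop_empty]
      have := hrest_le x hx
      omega
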